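-- pv_equiv track=rewrite | github.com/JunmoJeong/algorithms | 파이썬 1급 모의고사 5차 추가 코딩(코드)/5차-8 최대공약수.py | cm_cnt
-- ===== SOURCE A (Python) =====
-- def cm_cnt(a,b,c):
--     answer=0
--     i=1
--     while i<=a and i<=b and i<=c:
--         if a%i==0 and b%i==0 and c%i ==0:
--             answer +=1
--         i+=1
--     return answer
-- ===== SOURCE B (Python) =====
-- def _gcd(g, x):
--     while x:
--         g, x = x, g % x
--     return g
--
-- def cm_cnt(a, b, c):
--     if a < 1 or b < 1 or c < 1:
--         return 0
--     g = _gcd(_gcd(a, b), c)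
--     cnt = 0
--     d = 1
--     while d <= g:
--         if g % d == 0:
--             cnt += 1
--         d += 1
--     return cnt
-- ===== Notes on version B (the rewrite author's own statement) =====
-- stated objective: faster
-- what changed: Instead of scanning every i up to min(a,b,c) and testing divisibility of all three numbers, B computes g = gcd(a,b,c) by the Euclidean algorithm and counts the divisors of g, whose loop runs only g iterations (g <= min, and typically tiny).
import Mathlib
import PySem

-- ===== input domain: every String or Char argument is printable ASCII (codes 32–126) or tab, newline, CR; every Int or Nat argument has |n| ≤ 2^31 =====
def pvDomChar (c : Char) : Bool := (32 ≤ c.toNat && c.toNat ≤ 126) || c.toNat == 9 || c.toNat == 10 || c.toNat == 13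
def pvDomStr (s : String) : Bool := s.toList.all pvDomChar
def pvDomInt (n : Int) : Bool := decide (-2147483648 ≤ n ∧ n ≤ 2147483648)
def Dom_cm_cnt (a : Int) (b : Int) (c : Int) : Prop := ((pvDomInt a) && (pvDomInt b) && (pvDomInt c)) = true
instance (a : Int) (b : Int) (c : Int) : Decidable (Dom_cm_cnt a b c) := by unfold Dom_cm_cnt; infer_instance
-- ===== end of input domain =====

-- B replaces A's scan of 1..min(a,b,c) by computing g = gcd(a,b,c) with the Euclidean
-- algorithm and counting the divisors of g (objective: faster — far fewer loop iterations).

-- ===== PORT A =====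
-- while i<=a and i<=b and i<=c: if a%i==0 and b%i==0 and c%i==0: answer+=1; i+=1
def cmA_loop (a : Int) (b : Int) (c : Int) (i : Int) (answer : Int) : Int :=
  if h : i ≤ a ∧ i ≤ b ∧ i ≤ c then
    cmA_loop a b c (i + 1)
      (if PySem.Int.mod a i = 0 ∧ PySem.Int.mod b i = 0 ∧ PySem.Int.mod c i = 0
       then answer + 1 else answer)
  else answer
termination_by (a + 1 - i).toNat
decreasing_by omega

def cm_cnt (a : Int) (b : Int) (c : Int) : Int := cmA_loop a b c 1 0

-- ===== PORT B =====
-- _gcd: while x: g, x = x, g % x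
def pvGcdLoop (g : Int) (x : Int) : Int :=
  if h : x ≠ 0 then pvGcdLoop x (PySem.Int.mod g x) else g
termination_by x.natAbs
decreasing_by
  rcases lt_or_gt_of_ne h with hx | hx
  · have := PySem.Int.mod_neg_bounds (a := g) hx; omega
  · have h1 := PySem.Int.mod_nonneg (a := g) hx
    have h2 := PySem.Int.mod_lt (a := g) hx; omega

-- while d <= g: if g % d == 0: cnt += 1; d += 1
def pvCntLoop (g : Int) (d : Int) (cnt : Int) : Int :=
  if h : d ≤ g then
    pvCntLoop g (d + 1) (if PySem.Int.mod g d = 0 then cnt + 1 else cnt)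
  else cnt
termination_by (g + 1 - d).toNat
decreasing_by omega

def cm_cnt_alt (a : Int) (b : Int) (c : Int) : Int :=
  if a < 1 ∨ b < 1 ∨ c < 1 then 0
  else pvCntLoop (pvGcdLoop (pvGcdLoop a b) c) 1 0

-- ===== PRECONDITION & SPEC =====
def Spec_cm_cnt (a : Int) (b : Int) (c : Int) (out : Int) : Prop := out = cm_cnt_alt a b c
instance (a : Int) (b : Int) (c : Int) (out : Int) : Decidable (Spec_cm_cnt a b c out) := by unfold Spec_cm_cnt; infer_instance

-- ===== CLAIM (what is proved, stated in full; the proofs are below) =====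
def Claim_equal_cm_cnt : Prop := ∀ (a : Int) (b : Int) (c : Int), Dom_cm_cnt a b c → Spec_cm_cnt a b c (cm_cnt a b c)

-- ===== LEMMAS AND PROOFS =====

-- the Euclidean loop computes Int.gcd on nonnegative inputs
theorem pvGcdLoop_eq_aux (n : Nat) : ∀ (g x : Int), x.natAbs ≤ n → 0 ≤ g → 0 ≤ x →
    pvGcdLoop g x = (Int.gcd g x : Int) := by
  induction n with
  | zero =>
    intro g x hle hg hx
    have hx0 : x = 0 := by omega
    subst hx0
    rw [pvGcdLoop]
    simp [Int.gcd, Int.natAbs_of_nonneg hg]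
  | succ n ih =>
    intro g x hle hg hx
    by_cases h : x = 0
    · subst h; rw [pvGcdLoop]; simp [Int.gcd, Int.natAbs_of_nonneg hg]
    · have hxpos : 0 < x := lt_of_le_of_ne hx (Ne.symm h)
      have hm := PySem.Int.mod_eq_emod_of_pos (a := g) (b := x) hxpos
      have hmn := Int.emod_nonneg g (by omega)
      have hml := Int.emod_lt_of_pos g hxpos
      rw [pvGcdLoop, dif_pos h, hm]
      rw [ih x (g % x) (by omega) hx hmn]
      rw [Int.gcd_comm x (g % x), Int.gcd_emod]

theorem pvGcdLoop_eq (x g : Int) (hg : 0 ≤ g) (hx : 0 ≤ x) :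
    pvGcdLoop g x = (Int.gcd g x : Int) :=
  pvGcdLoop_eq_aux x.natAbs g x le_rfl hg hx

-- the counting loop never counts past g: for d > g it returns its accumulator
theorem pvCntLoop_of_gt (g d cnt : Int) (h : g < d) : pvCntLoop g d cnt = cnt := by
  rw [pvCntLoop]; simp [not_le.mpr h]

-- core synchronisation: on positive a,b,c, A's scan from i agrees with B's divisor
-- count of g = gcd(a,b,c) from the same index
theorem loops_agree (a b c : Int) (ha : 1 ≤ a) (hb : 1 ≤ b) (hc : 1 ≤ c)
    (g : Int) (hg : g = (Int.gcd (Int.gcd a b) c : Int)) :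
    ∀ i cnt, 1 ≤ i → cmA_loop a b c i cnt = pvCntLoop g i cnt := by
  have hgpos : 0 < g := by
    rw [hg]
    have : Int.gcd (Int.gcd a b) c ≠ 0 := by
      simp [Int.gcd_eq_zero_iff]
      omega
    exact_mod_cast Nat.pos_of_ne_zero this
  have hab : ((Int.gcd (Int.gcd a b) c : Nat) : Int) ∣ (Int.gcd a b : Int) :=
    Int.gcd_dvd_left _ _
  have hgdvda : g ∣ a := by
    rw [hg]; exact dvd_trans hab (Int.gcd_dvd_left _ _)
  have hgdvdb : g ∣ b := by
    rw [hg]; exact dvd_trans hab (Int.gcd_dvd_right _ _)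
  have hgdvdc : g ∣ c := by rw [hg]; exact Int.gcd_dvd_right _ _
  have hga : g ≤ a := Int.le_of_dvd (by omega) hgdvda
  have hgb : g ≤ b := Int.le_of_dvd (by omega) hgdvdb
  have hgc : g ≤ c := Int.le_of_dvd (by omega) hgdvdc
  have hPiff : ∀ i : Int, (i ∣ a ∧ i ∣ b ∧ i ∣ c) ↔ i ∣ g := by
    intro i
    constructor
    · rintro ⟨h1, h2, h3⟩
      rw [hg]
      have h12 : i ∣ (Int.gcd a b : Int) := Int.dvd_coe_gcd h1 h2
      exact Int.dvd_coe_gcd h12 h3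
    · intro hi
      exact ⟨dvd_trans hi hgdvda, dvd_trans hi hgdvdb, dvd_trans hi hgdvdc⟩
  intro i cnt hi
  induction hn : (a + 1 - i).toNat using Nat.strong_induction_on generalizing i cnt with
  | _ n ih =>
    by_cases hcond : i ≤ a ∧ i ≤ b ∧ i ≤ c
    · rw [cmA_loop, dif_pos hcond]
      by_cases hig : i ≤ g
      · rw [pvCntLoop, dif_pos hig]
        have hP : (PySem.Int.mod a i = 0 ∧ PySem.Int.mod b i = 0 ∧ PySem.Int.mod c i = 0)
            ↔ PySem.Int.mod g i = 0 := by
          rw [PySem.Int.mod_eq_zero_iff_dvd, PySem.Int.mod_eq_zero_iff_dvd,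
            PySem.Int.mod_eq_zero_iff_dvd, PySem.Int.mod_eq_zero_iff_dvd]
          exact hPiff i
        have : (if PySem.Int.mod a i = 0 ∧ PySem.Int.mod b i = 0 ∧ PySem.Int.mod c i = 0
            then cnt + 1 else cnt) = (if PySem.Int.mod g i = 0 then cnt + 1 else cnt) := by
          by_cases hcase : PySem.Int.mod g i = 0
          · rw [if_pos hcase, if_pos (hP.mpr hcase)]
          · rw [if_neg hcase, if_neg (fun hh => hcase (hP.mp hh))]
        rw [this]
        exact ih (a + 1 - (i + 1)).toNat (by omega) (i + 1) _ (by omega) rfl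
      · -- g < i: B's loop already stopped; A finds no further common divisor
        have hPfalse : ¬ (PySem.Int.mod a i = 0 ∧ PySem.Int.mod b i = 0 ∧ PySem.Int.mod c i = 0) := by
          intro hh
          have : i ∣ g := (hPiff i).mp (by
            rw [← PySem.Int.mod_eq_zero_iff_dvd, ← PySem.Int.mod_eq_zero_iff_dvd,
              ← PySem.Int.mod_eq_zero_iff_dvd]
            exact hh)
          have := Int.le_of_dvd hgpos this
          omega
        rw [if_neg hPfalse]
        rw [ih (a + 1 - (i + 1)).toNat (by omega) (i + 1) cnt (by omega) rfl]
        rw [pvCntLoop_of_gt g (i + 1) cnt (by omega),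
          pvCntLoop_of_gt g i cnt (by omega)]
    · rw [cmA_loop, dif_neg hcond]
      have : g < i := by omega
      rw [pvCntLoop_of_gt g i cnt this]

-- ===== VERDICT (by name: the statement is the Claim_ definition above) =====
theorem cm_cnt_spec : Claim_equal_cm_cnt := by
  intro a b c _
  unfold Spec_cm_cnt cm_cnt cm_cnt_alt
  by_cases h : a < 1 ∨ b < 1 ∨ c < 1
  · rw [if_pos h, cmA_loop]
    have : ¬ ((1:Int) ≤ a ∧ (1:Int) ≤ b ∧ (1:Int) ≤ c) := by omega
    simp [this]
  · have ha : 1 ≤ a := by omega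
    have hb : 1 ≤ b := by omega
    have hc : 1 ≤ c := by omega
    rw [if_neg (by omega)]
    have hg1 : pvGcdLoop a b = (Int.gcd a b : Int) := pvGcdLoop_eq b a (by omega) (by omega)
    have hg2 : pvGcdLoop (pvGcdLoop a b) c = (Int.gcd (Int.gcd a b) c : Int) := by
      rw [hg1]; exact pvGcdLoop_eq c _ (by positivity) (by omega)
    rw [hg2]
    exact loops_agree a b c ha hb hc _ rfl 1 0 le_rfl
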